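-- pv_equiv track=rewrite | github.com/SwapnopamMitra/Pr1malFrameWork | verify.py | inv_order2
-- ===== SOURCE A (Python) =====
-- def inv_order2(res):
--     out = res[:]
--     if len(out) >= 2:
--         out[1] = (out[0] + out[1]) & 0xffffffff
--     for i in range(2, len(out)):
--         pred = (2 * out[i-1] - out[i-2]) & 0xffffffff
--         out[i] = (pred + out[i]) & 0xffffffff
--     return out
-- ===== SOURCE B (Python) =====
-- def inv_order2(res):
--     if not res:
--         return []
--     out = [res[0]]
--     v = 0
--     for x in res[1:]:
--         v = (v + x) & 0xffffffff
--         out.append((out[-1] + v) & 0xffffffff)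
--     return out
-- ===== Notes on version B (the rewrite author's own statement) =====
-- stated objective: alternative
-- what changed: Replaces the two-term lookback prediction (2*out[i-1]-out[i-2]) with a single running velocity accumulator: v = (v+res[i]) & mask, out[i] = (out[i-1]+v) & mask, i.e. a double cumulative sum with one scalar of carried state instead of indexed access into the output.
import Mathlib
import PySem

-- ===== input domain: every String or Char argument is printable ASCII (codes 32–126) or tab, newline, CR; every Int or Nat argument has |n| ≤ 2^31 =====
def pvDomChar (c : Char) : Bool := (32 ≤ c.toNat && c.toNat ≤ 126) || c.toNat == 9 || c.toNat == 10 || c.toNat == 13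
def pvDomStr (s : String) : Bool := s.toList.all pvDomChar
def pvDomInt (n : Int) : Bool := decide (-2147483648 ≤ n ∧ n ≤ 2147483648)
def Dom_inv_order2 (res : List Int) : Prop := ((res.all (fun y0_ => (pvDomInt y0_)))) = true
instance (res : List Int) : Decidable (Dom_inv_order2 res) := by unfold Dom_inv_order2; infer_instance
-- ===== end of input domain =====

-- B replaces A's two-term lookback prediction with a single running velocity accumulator
-- (double cumulative sum); same O(n) cost, different maintained state.

-- ===== PORT A =====
-- literal transliteration of Source A: copy, fix up index 1, then an index loop
-- with the two-term lookback prediction (2*out[i-1] - out[i-2]) & mask.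
def inv_order2 (res : List Int) : List Int :=
  let out := res
  let out := if 2 ≤ out.length then
      PySem.List.pySetD out 1
        (PySem.Int.band (PySem.List.pyGetD out 0 0 + PySem.List.pyGetD out 1 0) 4294967295)
    else out
  (PySem.List.pyRange 2 (out.length : Int) 1).foldl
    (fun out i =>
      let pred := PySem.Int.band
        (2 * PySem.List.pyGetD out (i - 1) 0 - PySem.List.pyGetD out (i - 2) 0) 4294967295
      PySem.List.pySetD out i (PySem.Int.band (pred + PySem.List.pyGetD out i 0) 4294967295))
    out

-- ===== PORT B =====
-- literal transliteration of Source B: append loop over res[1:] carrying the velocity v.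
def inv_order2_alt (res : List Int) : List Int :=
  if h : res = [] then []
  else
    let r0 := res.head h
    let st := (PySem.List.slice res (some 1) none).foldl
      (fun (st : List Int × Int) x =>
        let v := PySem.Int.band (st.2 + x) 4294967295
        (st.1 ++ [PySem.Int.band (PySem.List.pyGetD st.1 (-1) 0 + v) 4294967295], v))
      ([r0], 0)
    st.1

-- ===== PRECONDITION & SPEC =====
def Spec_inv_order2 (res : List Int) (out : List Int) : Prop := out = inv_order2_alt res
instance (res : List Int) (out : List Int) : Decidable (Spec_inv_order2 res out) := by unfold Spec_inv_order2; infer_instance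

-- ===== CLAIM (what is proved, stated in full; the proofs are below) =====
def Claim_equal_inv_order2 : Prop := ∀ (res : List Int), Dom_inv_order2 res → Spec_inv_order2 res (inv_order2 res)

-- ===== LEMMAS AND PROOFS =====

-- masking by 0xffffffff is reduction mod 2^32 (Python-exact, also on negatives)
theorem pvBandMask (x : Int) : PySem.Int.band x 4294967295 = x % 4294967296 := by
  unfold PySem.Int.band
  split_ifs with h1 h2 h2 <;> try omega
  · rw [show ((4294967295 : Int).toNat) = 2 ^ 32 - 1 from rfl,
      Nat.and_two_pow_sub_one_eq_mod]
    omega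
  · rw [show ((4294967295 : Int).toNat) = 2 ^ 32 - 1 from rfl,
      Nat.and_comm, Nat.and_two_pow_sub_one_eq_mod]
    omega

-- reference sequence of A's loop: two-term lookback (q = out[i-2], p = out[i-1])
def pvGoA (q p : Int) : List Int → List Int
  | [] => []
  | x :: xs =>
    let y := ((2 * p - q) % 4294967296 + x) % 4294967296
    y :: pvGoA p y xs

-- reference sequence of B's loop: velocity accumulator
def pvGo (p v : Int) : List Int → List Int
  | [] => []
  | x :: xs =>
    let v' := (v + x) % 4294967296
    let p' := (p + v') % 4294967296
    p' :: pvGo p' v' xs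

theorem pvSetMid {α : Type} (init : List α) (x y : α) (rest : List α) :
    (init ++ x :: rest).set init.length y = init ++ y :: rest := by
  induction init with
  | nil => rfl
  | cons a l ih => simp

-- A's index loop, started with two finished cells [q, p] at the end of `init`,
-- produces pvGoA q p on the pending suffix.
theorem pvLoopA (pending : List Int) : ∀ (init : List Int) (q p : Int),
    (PySem.List.pyRange ((init ++ [q, p]).length : Int)
        (((init ++ [q, p]).length : Int) + (pending.length : Int)) 1).foldl
      (fun out i =>
        let pred := PySem.Int.band
          (2 * PySem.List.pyGetD out (i - 1) 0 - PySem.List.pyGetD out (i - 2) 0) 4294967295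
        PySem.List.pySetD out i (PySem.Int.band (pred + PySem.List.pyGetD out i 0) 4294967295))
      ((init ++ [q, p]) ++ pending)
    = (init ++ [q, p]) ++ pvGoA q p pending := by
  induction pending with
  | nil =>
    intro init q p
    rw [PySem.List.pyRange_one_eq_nil (by simp)]
    simp [pvGoA]
  | cons x xs ih =>
    intro init q p
    have hlen : ((init ++ [q, p]).length : Int) <
        ((init ++ [q, p]).length : Int) + ((x :: xs).length : Int) := by
      simp
    rw [PySem.List.pyRange_one_cons hlen, List.foldl_cons]
    have e1 : PySem.List.pyGetD ((init ++ [q, p]) ++ x :: xs)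
        (((init ++ [q, p]).length : Int) - 1) 0 = p := by
      have : (((init ++ [q, p]).length : Int) - 1) = ((init.length + 1 : Nat) : Int) := by
        simp only [List.length_append, List.length_cons, List.length_nil]; omega
      rw [this, PySem.List.pyGetD_natCast]
      have : (init ++ [q, p]) ++ x :: xs = (init ++ [q]) ++ p :: (x :: xs) := by simp
      rw [this]
      simp
    have e2 : PySem.List.pyGetD ((init ++ [q, p]) ++ x :: xs)
        (((init ++ [q, p]).length : Int) - 2) 0 = q := by
      have : (((init ++ [q, p]).length : Int) - 2) = ((init.length : Nat) : Int) := by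
        simp only [List.length_append, List.length_cons, List.length_nil]; omega
      rw [this, PySem.List.pyGetD_natCast]
      have : (init ++ [q, p]) ++ x :: xs = init ++ q :: (p :: x :: xs) := by simp
      rw [this]
      simp
    have e3 : PySem.List.pyGetD ((init ++ [q, p]) ++ x :: xs)
        (((init ++ [q, p]).length : Int)) 0 = x := by
      rw [show (((init ++ [q, p]).length : Int)) = (((init ++ [q, p]).length : Nat) : Int) from rfl,
        PySem.List.pyGetD_natCast]
      simp
    rw [e1, e2, e3]
    set y := PySem.Int.band (PySem.Int.band (2 * p - q) 4294967295 + x) 4294967295 with hy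
    have e4 : PySem.List.pySetD ((init ++ [q, p]) ++ x :: xs)
        (((init ++ [q, p]).length : Int)) y = (init ++ [q, p]) ++ y :: xs := by
      rw [show (((init ++ [q, p]).length : Int)) = (((init ++ [q, p]).length : Nat) : Int) from rfl,
        PySem.List.pySetD_natCast]
      exact pvSetMid (init ++ [q, p]) x y xs
    rw [e4]
    have hre : (init ++ [q, p]) ++ y :: xs = ((init ++ [q]) ++ [p, y]) ++ xs := by simp
    have hr1 : ((init ++ [q, p]).length : Int) + ((x :: xs).length : Int)
        = (((init ++ [q]) ++ [p, y]).length : Int) + (xs.length : Int) := by simp only [List.length_append, List.length_cons, List.length_nil]; push_cast; omega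
    have hr2 : ((init ++ [q, p]).length : Int) + 1 = (((init ++ [q]) ++ [p, y]).length : Int) := by
      simp only [List.length_append, List.length_cons, List.length_nil]; push_cast; omega
    rw [hre, hr1, hr2, ih (init ++ [q]) p y]
    have : y = ((2 * p - q) % 4294967296 + x) % 4294967296 := by
      rw [hy, pvBandMask, pvBandMask]
    simp [pvGoA, this]

-- B's append loop produces pvGo on the suffix.
theorem pvLoopB (xs : List Int) : ∀ (acc : List Int) (a : Int) (v : Int),
    (xs.foldl
      (fun (st : List Int × Int) x =>
        let v := PySem.Int.band (st.2 + x) 4294967295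
        (st.1 ++ [PySem.Int.band (PySem.List.pyGetD st.1 (-1) 0 + v) 4294967295], v))
      (acc ++ [a], v)).1
    = (acc ++ [a]) ++ pvGo a v xs := by
  induction xs with
  | nil => intro acc a v; simp [pvGo]
  | cons x t ih =>
    intro acc a v
    rw [List.foldl_cons]
    simp only [pvBandMask, PySem.List.pyGetD_neg_one_append_singleton] at ih ⊢
    rw [ih (acc ++ [a]) ((a + (v + x) % 4294967296) % 4294967296) ((v + x) % 4294967296)]
    simp [pvGo]

-- the two reference sequences agree when v represents p - q modulo 2^32
theorem pvBridge (xs : List Int) : ∀ (q p v : Int), 0 ≤ v → v < 4294967296 →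
    (v - (p - q)) % 4294967296 = 0 → pvGoA q p xs = pvGo p v xs := by
  induction xs with
  | nil => intro q p v _ _ _; rfl
  | cons x t ih =>
    intro q p v h0 h1 h2
    simp only [pvGoA, pvGo]
    have hy : ((2 * p - q) % 4294967296 + x) % 4294967296
        = (p + (v + x) % 4294967296) % 4294967296 := by omega
    rw [hy]
    congr 1
    exact ih p _ _ (by omega) (by omega) (by omega)

theorem pvAltEq (res : List Int) : inv_order2_alt res =
    match res with
    | [] => []
    | r0 :: rest => (r0 :: pvGo r0 0 rest) := by
  match res with
  | [] => rfl
  | r0 :: rest =>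
    unfold inv_order2_alt
    rw [dif_neg (by simp)]
    simp only [PySem.List.slice_from_one, List.tail_cons, List.head_cons]
    have := pvLoopB rest [] r0 0
    simpa using this

-- ===== VERDICT (by name: the statement is the Claim_ definition above) =====
theorem inv_order2_spec : Claim_equal_inv_order2 := by
  intro res _
  unfold Spec_inv_order2
  rw [pvAltEq]
  match res with
  | [] => rfl
  | [r0] => rfl
  | r0 :: r1 :: rest =>
    unfold inv_order2
    have hset : PySem.List.pySetD (r0 :: r1 :: rest) 1
        (PySem.Int.band (PySem.List.pyGetD (r0 :: r1 :: rest) 0 0 +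
          PySem.List.pyGetD (r0 :: r1 :: rest) 1 0) 4294967295)
        = r0 :: ((r0 + r1) % 4294967296) :: rest := by
      rw [show (1 : Int) = ((1 : Nat) : Int) from rfl, PySem.List.pySetD_natCast]
      simp [pvBandMask, PySem.List.pyGetD_zero_cons]
      rw [show (1 : Int) = ((1 : Nat) : Int) from rfl, PySem.List.pyGetD_natCast]
      rfl
    simp only [List.length_cons]
    rw [if_pos (by omega), hset,
      show (r0 :: ((r0 + r1) % 4294967296) :: rest : List Int)
        = ([] ++ [r0, (r0 + r1) % 4294967296]) ++ rest from by simp]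
    have hA := pvLoopA rest [] r0 ((r0 + r1) % 4294967296)
    rw [show ((([] ++ [r0, (r0 + r1) % 4294967296] : List Int)).length : Int) = (2 : Int)
      from by simp] at hA
    rw [show (((([] ++ [r0, (r0 + r1) % 4294967296]) ++ rest : List Int)).length : Int)
        = (2 : Int) + (rest.length : Int)
      from by simp only [List.nil_append, List.length_append, List.length_cons,
        List.length_nil]; omega]
    rw [hA]
    have hb : pvGoA r0 ((r0 + r1) % 4294967296) rest
        = pvGo ((r0 + r1) % 4294967296) ((0 + r1) % 4294967296) rest := by
      apply pvBridge <;> omega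
    simp [pvGo, hb]
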